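-- pv_equiv track=rewrite | github.com/devcexx/QCluskey | qcluskey.py | qcluskey_maxterm_multiply
-- ===== SOURCE A (Python) =====
-- def qcluskey_maxterm_multiply(terms):
--     length = len(terms)
--     if length == 0:
--         return []
--     if length == 1:
--         return terms[0]
--     if length == 2:
--         result = []
--         for fterm in terms[0]:
--             for sterm in terms[1]:
--                 result.append(fterm + sterm)
--         return result
--     return qcluskey_maxterm_multiply([qcluskey_maxterm_multiply(terms[:2])] + terms[2:])
-- ===== SOURCE B (Python) =====
-- def qcluskey_maxterm_multiply(terms):
--     if not terms:
--         return []
--     result = terms[0]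
--     for term in terms[1:]:
--         result = [r + t for r in result for t in term]
--     return result
-- ===== Notes on version B (the rewrite author's own statement) =====
-- stated objective: simpler
-- what changed: Replaced A's recursion (collapse the first two term lists and recurse on the shortened list) with a single iterative left-fold that keeps a running list of accumulated concatenations.
import Mathlib
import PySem

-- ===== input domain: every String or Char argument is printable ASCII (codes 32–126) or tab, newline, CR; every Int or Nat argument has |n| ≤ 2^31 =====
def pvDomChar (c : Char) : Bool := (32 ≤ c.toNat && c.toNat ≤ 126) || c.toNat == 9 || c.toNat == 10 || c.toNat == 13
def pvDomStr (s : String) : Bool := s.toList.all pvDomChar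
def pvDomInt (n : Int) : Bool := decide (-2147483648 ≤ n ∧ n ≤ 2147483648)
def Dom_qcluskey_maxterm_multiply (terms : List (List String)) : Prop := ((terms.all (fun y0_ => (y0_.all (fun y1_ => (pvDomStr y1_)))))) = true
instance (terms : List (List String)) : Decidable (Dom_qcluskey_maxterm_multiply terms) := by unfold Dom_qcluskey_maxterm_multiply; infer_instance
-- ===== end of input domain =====

-- B replaces A's recursion over the term list with an iterative left-fold; objective: simpler.

-- ===== PORT A =====
-- A: recursion; length-2 case builds the product with nested loops appending to result.
def qcluskey_maxterm_multiply : List (List String) → List String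
  | [] => []
  | [t] => t
  | [t1, t2] =>
      t1.foldl (fun result fterm =>
        t2.foldl (fun result sterm => result ++ [fterm ++ sterm]) result) []
  | t1 :: t2 :: r :: rest =>
      qcluskey_maxterm_multiply (qcluskey_maxterm_multiply [t1, t2] :: r :: rest)
  termination_by terms => terms.length
  decreasing_by all_goals (simp; try omega)

-- ===== PORT B =====
-- B: result = terms[0]; for each later term list, result = [r + t for r in result for t in term].
def qcluskey_maxterm_multiply_alt : List (List String) → List String
  | [] => []
  | t :: rest =>
      rest.foldl (fun result term =>
        result.flatMap (fun r => term.map (fun t => r ++ t))) t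

-- ===== PRECONDITION & SPEC =====
def Spec_qcluskey_maxterm_multiply (terms : List (List String)) (out : List String) : Prop := out = qcluskey_maxterm_multiply_alt terms
instance (terms : List (List String)) (out : List String) : Decidable (Spec_qcluskey_maxterm_multiply terms out) := by unfold Spec_qcluskey_maxterm_multiply; infer_instance

-- ===== CLAIM (what is proved, stated in full; the proofs are below) =====
def Claim_equal_qcluskey_maxterm_multiply : Prop := ∀ (terms : List (List String)), Dom_qcluskey_maxterm_multiply terms → Spec_qcluskey_maxterm_multiply terms (qcluskey_maxterm_multiply terms)

-- ===== LEMMAS AND PROOFS =====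

theorem pv_flat_single (g : String → String) (l : List String) :
    (l.map (fun x => [g x])).flatten = l.map g := by
  induction l with
  | nil => rfl
  | cons x l ih => simp [ih]

-- A's pairwise product equals B's flatMap step.
theorem pv_pair (t1 t2 : List String) (acc : List String) :
    t1.foldl (fun result fterm =>
        t2.foldl (fun result sterm => result ++ [fterm ++ sterm]) result) acc
      = acc ++ t1.flatMap (fun r => t2.map (fun t => r ++ t)) := by
  induction t1 generalizing acc with
  | nil => simp [List.foldl]
  | cons f t1 ih => simp [List.foldl, List.flatMap, pv_flat_single]

theorem pv_agree : ∀ (terms : List (List String)),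
    qcluskey_maxterm_multiply terms = qcluskey_maxterm_multiply_alt terms
  | [] => by
      simp [qcluskey_maxterm_multiply, qcluskey_maxterm_multiply_alt]
  | [t] => by
      simp [qcluskey_maxterm_multiply, qcluskey_maxterm_multiply_alt]
  | [t1, t2] => by
      simp [qcluskey_maxterm_multiply, qcluskey_maxterm_multiply_alt, List.flatMap,
        List.foldl, pv_flat_single]
  | t1 :: t2 :: r :: rest => by
      rw [qcluskey_maxterm_multiply, pv_agree (qcluskey_maxterm_multiply [t1, t2] :: r :: rest)]
      simp only [qcluskey_maxterm_multiply, qcluskey_maxterm_multiply_alt, List.foldl]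
      rw [pv_pair]
      simp
  termination_by terms => terms.length
  decreasing_by all_goals (simp; try omega)

-- ===== VERDICT (by name: the statement is the Claim_ definition above) =====
theorem qcluskey_maxterm_multiply_spec : Claim_equal_qcluskey_maxterm_multiply := by
  intro terms _
  exact pv_agree terms
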